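-- pv_equiv track=rewrite | github.com/andrzejf1994/HA-iOS-NextAlarm | custom_components/ha_ios_nextalarm/helpers.py | detect_weekday_locale
-- ===== SOURCE A (Python) =====
-- import unicodedata
-- from typing import Any, Mapping, Sequence
--
-- def normalize_day_key(value: str) -> str:
--     """Normalize weekday names for lookup."""
--
--     normalized = unicodedata.normalize("NFKD", value or "")
--     stripped = "".join(ch for ch in normalized if not unicodedata.combining(ch))
--     return stripped.replace(" ", "").replace("-", "").casefold().strip()
--
-- def detect_weekday_locale(
--     weekday_lines: Sequence[str],
--     locale_option: str,
--     maps: Mapping[str, Mapping[str, int]],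
-- ) -> str:
--     """Detect the best matching weekday locale."""
--
--     default_locale = next(iter(maps))
--     if locale_option != "auto":
--         return locale_option if locale_option in maps else default_locale
--     if not weekday_lines:
--         return default_locale
--
--     best_locale = None
--     best_score = -1
--     normalized_lines = [normalize_day_key(item) for item in weekday_lines]
--     for locale, mapping in maps.items():
--         score = sum(1 for item in normalized_lines if item in mapping)
--         if score > best_score:
--             best_locale = locale
--             best_score = score
--     if best_locale is None:
--         return default_locale
--     return best_locale
-- ===== SOURCE B (Python) =====
-- import unicodedata
-- from collections import Counter
--
--
-- def _norm(value):
--     normalized = unicodedata.normalize("NFKD", value or "")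
--     stripped = "".join(ch for ch in normalized if not unicodedata.combining(ch))
--     return stripped.replace(" ", "").replace("-", "").casefold().strip()
--
--
-- def detect_weekday_locale(weekday_lines, locale_option, maps):
--     if locale_option != "auto":
--         return locale_option if locale_option in maps else next(iter(maps))
--     if not weekday_lines:
--         return next(iter(maps))
--     counts = Counter(_norm(item) for item in weekday_lines)
--     return max(maps, key=lambda locale: sum(counts[key] for key in maps[locale]))
-- ===== Notes on version B (the rewrite author's own statement) =====
-- stated objective: alternative
-- what changed: Instead of rescanning all normalized lines once per locale, B builds a Counter of the normalized lines once, scores each locale by summing the counter over that locale's own keys, and picks the winner with max(maps, key=...), whose first-maximal rule equals A's strict-greater first-wins running argmax.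
import Mathlib
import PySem

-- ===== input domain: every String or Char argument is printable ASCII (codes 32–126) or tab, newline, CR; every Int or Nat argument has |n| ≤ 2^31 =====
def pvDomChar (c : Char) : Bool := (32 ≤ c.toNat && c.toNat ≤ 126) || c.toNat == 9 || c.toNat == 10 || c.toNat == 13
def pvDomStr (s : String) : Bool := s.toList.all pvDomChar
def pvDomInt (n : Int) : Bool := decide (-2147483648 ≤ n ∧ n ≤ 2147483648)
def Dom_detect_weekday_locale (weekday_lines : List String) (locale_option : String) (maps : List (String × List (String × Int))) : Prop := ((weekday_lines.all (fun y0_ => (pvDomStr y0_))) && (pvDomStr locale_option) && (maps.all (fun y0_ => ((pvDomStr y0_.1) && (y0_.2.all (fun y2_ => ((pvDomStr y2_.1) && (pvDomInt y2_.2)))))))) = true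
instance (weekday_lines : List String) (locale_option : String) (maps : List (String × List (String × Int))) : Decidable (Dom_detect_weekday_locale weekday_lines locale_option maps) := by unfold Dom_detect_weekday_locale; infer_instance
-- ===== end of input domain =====

-- B replaces A's per-locale rescan of all lines (locale × line nested passes) by a Counter of the
-- normalized lines built once, a per-locale sum over that counter's entries for the locale's own
-- keys, and Python's max(maps, key=…) (first maximal element = A's strict-greater first-wins
-- tie-break); objective: alternative.

-- normalize_day_key: on the ASCII domain NFKD is the identity and no combining characters occur,
-- and casefold coincides with lower; exact there.
def pvNorm (value : String) : String :=
  PySem.Str.strip (PySem.Str.lower (PySem.Str.replace (PySem.Str.replace value " " "") "-" ""))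

-- ===== PORT A =====
def detect_weekday_locale (weekday_lines : List String) (locale_option : String) (maps : List (String × List (String × Int))) : String :=
  -- the dict arguments, as Python receives them
  let d : PySem.Dict String (PySem.Dict String Int) :=
    PySem.Dict.ofList (maps.map (fun p => (p.1, PySem.Dict.ofList p.2)))
  let default_locale := d.keys.headI   -- next(iter(maps)); maps = [] (StopIteration) is outside Pre_
  if locale_option ≠ "auto" then
    (if d.contains locale_option then locale_option else default_locale)
  else if weekday_lines = [] then default_locale
  else
    let normalized_lines := weekday_lines.map pvNorm
    let best := d.items.foldl
      (fun (acc : Option String × Int) p =>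
        let score : Int := (normalized_lines.countP (fun item => p.2.contains item) : Int)
        if score > acc.2 then (some p.1, score) else acc)
      (none, -1)
    match best.1 with
    | none => default_locale
    | some l => l

-- ===== PORT B =====
def detect_weekday_locale_alt (weekday_lines : List String) (locale_option : String) (maps : List (String × List (String × Int))) : String :=
  let d : PySem.Dict String (PySem.Dict String Int) :=
    PySem.Dict.ofList (maps.map (fun p => (p.1, PySem.Dict.ofList p.2)))
  if locale_option ≠ "auto" then
    (if d.contains locale_option then locale_option else d.keys.headI)
  else if weekday_lines = [] then d.keys.headI
  else
    let counts : PySem.Dict String Int := PySem.Dict.counter (weekday_lines.map pvNorm)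
    match PySem.List.max? d.keys
        (fun locale => ((d.getD locale PySem.Dict.empty).keys.map (fun key => counts.getD key 0)).sum) with
    | some l => l
    | none => d.keys.headI   -- unreachable under Pre_ (maps ≠ []): Python's max would raise on empty

-- ===== PRECONDITION & SPEC =====
-- Pre_ excludes only empty maps, on which A raises StopIteration at next(iter(maps)).
def Pre_detect_weekday_locale (weekday_lines : List String) (locale_option : String) (maps : List (String × List (String × Int))) : Prop := maps ≠ []
instance (weekday_lines : List String) (locale_option : String) (maps : List (String × List (String × Int))) : Decidable (Pre_detect_weekday_locale weekday_lines locale_option maps) := by unfold Pre_detect_weekday_locale; infer_instance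

def pvWitness_detect_weekday_locale : List String × String × (List (String × List (String × Int))) :=
  (["Mon day"], "auto", [("en", [("monday", 0)]), ("pl", [("poniedzialek", 0)])])

def Spec_detect_weekday_locale (weekday_lines : List String) (locale_option : String) (maps : List (String × List (String × Int))) (out : String) : Prop := out = detect_weekday_locale_alt weekday_lines locale_option maps
instance (weekday_lines : List String) (locale_option : String) (maps : List (String × List (String × Int))) (out : String) : Decidable (Spec_detect_weekday_locale weekday_lines locale_option maps out) := by unfold Spec_detect_weekday_locale; infer_instance

-- ===== CLAIM (what is proved, stated in full; the proofs are below) =====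
def Claim_equal_detect_weekday_locale : Prop := ∀ (weekday_lines : List String) (locale_option : String) (maps : List (String × List (String × Int))), Dom_detect_weekday_locale weekday_lines locale_option maps → Pre_detect_weekday_locale weekday_lines locale_option maps → Spec_detect_weekday_locale weekday_lines locale_option maps (detect_weekday_locale weekday_lines locale_option maps)

-- ===== LEMMAS AND PROOFS =====

-- values of d.update ps come from d or from ps
lemma pv_values_update (ps : List (String × PySem.Dict String Int)) :
    ∀ (d : PySem.Dict String (PySem.Dict String Int)) (v : PySem.Dict String Int),
      v ∈ (d.update ps).values → v ∈ d.values ∨ v ∈ ps.map (fun p => p.2) := by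
  induction ps with
  | nil => intro d v h; exact Or.inl h
  | cons p t ih =>
    intro d v h
    have h' : v ∈ ((d.insert p.1 p.2).update t).values := h
    rcases ih (d.insert p.1 p.2) v h' with h'' | h''
    · rcases PySem.Dict.mem_values_insert d p.1 p.2 v h'' with h3 | h3
      · right; simp [h3]
      · left; exact h3
    · right; simp only [List.map_cons, List.mem_cons]; exact Or.inr h''

-- every inner dict of the converted argument has Nodup keys
lemma pv_inner_nodup (maps : List (String × List (String × Int))) :
    ∀ p ∈ (PySem.Dict.ofList (maps.map (fun q => (q.1, PySem.Dict.ofList q.2)))).items,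
      p.2.keys.Nodup := by
  intro p hp
  have hv : p.2 ∈ (PySem.Dict.ofList (maps.map (fun q => (q.1, PySem.Dict.ofList q.2)))).values := by
    simp only [PySem.Dict.values]
    exact List.mem_map_of_mem hp
  rcases pv_values_update _ _ _ hv with h | h
  · simp [PySem.Dict.empty, PySem.Dict.values] at h
  · simp only [List.map_map, List.mem_map] at h
    rcases h with ⟨q, _, hq⟩
    rw [← hq]
    exact PySem.Dict.nodup_keys_ofList q.2

-- counting matches of a cons'd key set splits off that key's count
lemma pv_countP_cons (k : String) (t xs : List String) (hk : k ∉ t) :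
    xs.countP (fun x => decide (x ∈ k :: t)) = xs.count k + xs.countP (fun x => decide (x ∈ t)) := by
  induction xs with
  | nil => simp
  | cons x xs ihx =>
    rw [List.countP_cons, List.countP_cons, List.count_cons, ihx]
    by_cases hx : x = k
    · subst hx
      have ht : x ∉ t := hk
      simp [ht]
      omega
    · have hx' : (x == k) = false := beq_eq_false_iff_ne.mpr hx
      simp [hx, hx']
      omega

-- over a Nodup key list, summing per-key counts is counting membership
lemma pv_sum_count (ks : List String) (xs : List String) (h : ks.Nodup) :
    (ks.map (fun k => ((xs.count k : Nat) : Int))).sum = ((xs.countP (fun x => decide (x ∈ ks)) : Nat) : Int) := by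
  induction ks with
  | nil => simp
  | cons k t ih =>
    simp only [List.nodup_cons] at h
    rw [List.map_cons, List.sum_cons, ih h.2, pv_countP_cons k t xs h.1]
    push_cast
    ring

-- B's per-locale key value equals A's score for that locale
lemma pv_score (d : PySem.Dict String (PySem.Dict String Int)) (wl : List String)
    (hnd : d.keys.Nodup) (hin : ∀ p ∈ d.items, p.2.keys.Nodup)
    (p : String × PySem.Dict String Int) (hp : p ∈ d.items) :
    ((d.getD p.1 PySem.Dict.empty).keys.map
        (fun key => (PySem.Dict.counter (wl.map pvNorm)).getD key 0)).sum
      = (((wl.map pvNorm).countP (fun item => p.2.contains item) : Nat) : Int) := by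
  have hp' : (p.1, p.2) ∈ d.items := by rw [Prod.mk.eta]; exact hp
  have hget : d.getD p.1 PySem.Dict.empty = p.2 :=
    PySem.Dict.getD_of_mem_items d hp' hnd PySem.Dict.empty
  rw [hget]
  have hmap : p.2.keys.map (fun key => (PySem.Dict.counter (wl.map pvNorm)).getD key 0)
      = p.2.keys.map (fun key => (((wl.map pvNorm).count key : Nat) : Int)) := by
    apply List.map_congr_left
    intro k _
    rw [PySem.Dict.getD_counter]
  rw [hmap, pv_sum_count _ _ (hin p hp)]
  congr 1
  apply List.countP_congr
  intro x _
  rw [PySem.Dict.contains_eq_decide_mem_keys]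

-- Python's running max (keep the incumbent unless the newcomer is strictly larger), named
def pvMaxStep (g : String → Int) (acc : Option String) (x : String) : Option String :=
  match acc with
  | none => some x
  | some m => if g m < g x then some x else some m

lemma pv_max_eq (g : String → Int) (xs : List String) :
    PySem.List.max? xs g = xs.foldl (pvMaxStep g) none := by
  unfold PySem.List.max?
  apply PySem.List.foldl_congr_mem
  intro acc x _
  cases acc <;> rfl

-- A's running argmax with nonnegative scores g is Python's max (first maximal element)
lemma pv_argmax_some (g : String → Int) (t : List (String × PySem.Dict String Int)) :
    ∀ (m : String),
      (t.foldl (fun (acc : Option String × Int) p =>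
          if g p.1 > acc.2 then (some p.1, g p.1) else acc) (some m, g m)).1
        = t.foldl (fun acc p => pvMaxStep g acc p.1) (some m) := by
  induction t with
  | nil => intro m; rfl
  | cons p t ih =>
    intro m
    simp only [List.foldl_cons, pvMaxStep]
    by_cases hc : g m < g p.1
    · rw [if_pos hc, if_pos hc]; exact ih p.1
    · rw [if_neg hc, if_neg hc]; exact ih m

lemma pv_argmax (g : String → Int) (hg : ∀ x, 0 ≤ g x)
    (ps : List (String × PySem.Dict String Int)) :
    (ps.foldl (fun (acc : Option String × Int) p =>
        if g p.1 > acc.2 then (some p.1, g p.1) else acc) (none, -1)).1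
      = PySem.List.max? (ps.map (fun p => p.1)) g := by
  rw [pv_max_eq, List.foldl_map]
  cases ps with
  | nil => rfl
  | cons p t =>
    simp only [List.foldl_cons]
    rw [if_pos (by have := hg p.1; omega : g p.1 > (-1 : Int))]
    exact pv_argmax_some g t p.1

-- ===== VERDICT (by name: the statement is the Claim_ definition above) =====
theorem detect_weekday_locale_spec : Claim_equal_detect_weekday_locale := by
  intro wl lo maps _dom _hpre
  unfold Spec_detect_weekday_locale detect_weekday_locale detect_weekday_locale_alt
  by_cases h1 : lo = "auto"
  · simp only [h1, ne_eq, not_true_eq_false, if_false]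
    by_cases h2 : wl = []
    · simp [h2]
    · simp only [h2, if_false]
      set d := PySem.Dict.ofList (maps.map (fun p => (p.1, PySem.Dict.ofList p.2))) with hd
      have hnd : d.keys.Nodup := PySem.Dict.nodup_keys_ofList _
      have hin : ∀ p ∈ d.items, p.2.keys.Nodup := pv_inner_nodup maps
      have hg : ∀ x, 0 ≤ ((d.getD x PySem.Dict.empty).keys.map
          (fun key => (PySem.Dict.counter (wl.map pvNorm)).getD key 0)).sum := by
        intro x
        apply List.sum_nonneg
        intro v hv
        rcases List.mem_map.mp hv with ⟨k, _, hk⟩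
        rw [← hk, PySem.Dict.getD_counter]
        positivity
      have hmain :
          (d.items.foldl (fun (acc : Option String × Int) p =>
              if (((wl.map pvNorm).countP (fun item => p.2.contains item) : Nat) : Int) > acc.2
              then (some p.1, (((wl.map pvNorm).countP (fun item => p.2.contains item) : Nat) : Int)) else acc) (none, -1)).1
            = PySem.List.max? d.keys (fun locale => ((d.getD locale PySem.Dict.empty).keys.map
                (fun key => (PySem.Dict.counter (wl.map pvNorm)).getD key 0)).sum) := by
        have hfoldeq :
            (d.items.foldl (fun (acc : Option String × Int) p =>
                if (((wl.map pvNorm).countP (fun item => p.2.contains item) : Nat) : Int) > acc.2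
                then (some p.1, (((wl.map pvNorm).countP (fun item => p.2.contains item) : Nat) : Int)) else acc) (none, -1))
              = (d.items.foldl (fun (acc : Option String × Int) p =>
                if ((d.getD p.1 PySem.Dict.empty).keys.map
                      (fun key => (PySem.Dict.counter (wl.map pvNorm)).getD key 0)).sum > acc.2
                then (some p.1, ((d.getD p.1 PySem.Dict.empty).keys.map
                      (fun key => (PySem.Dict.counter (wl.map pvNorm)).getD key 0)).sum) else acc) (none, -1)) := by
          apply PySem.List.foldl_congr_mem
          intro acc p hp
          rw [pv_score d wl hnd hin p hp]
        rw [hfoldeq]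
        exact pv_argmax _ hg d.items
      cases hmax : PySem.List.max? d.keys (fun locale => ((d.getD locale PySem.Dict.empty).keys.map
          (fun key => (PySem.Dict.counter (wl.map pvNorm)).getD key 0)).sum) with
      | none => rw [hmax] at hmain; rw [hmain]
      | some l => rw [hmax] at hmain; rw [hmain]
  · simp [h1]
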